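-- pv_equiv track=rewrite | github.com/JohanEddeland/AdventOfCode | 2018/05/aoc_05.py | replace_all_polymer
-- ===== SOURCE A (Python) =====
-- def replace_all_polymer(aoc_input):
--     aoc_input = aoc_input.replace('\n', '')
--     finished_loop = False
--
--     while not finished_loop:
--         replace_in_this_loop = 0
--
--         if len(aoc_input) == 0:
--             finished_loop = True
--         for k in range(1, len(aoc_input)):
--             if k > len(aoc_input) - 1:
--                 break
--             previous_letter = aoc_input[k - 1]
--             this_letter = aoc_input[k]
--             if same_type_different_polarity(this_letter, previous_letter):
--                 aoc_input = replace_one_substring(aoc_input, k)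
--
--                 replace_in_this_loop += 1
--
--         if replace_in_this_loop == 0:
--             finished_loop = True
--
--     return aoc_input
--
-- def same_type_different_polarity(letter1, letter2):
--     letter_difference = ord(letter1) - ord(letter2)
--     if abs(letter_difference) == 32:
--         return True
--     else:
--         return False
--
-- def replace_one_substring(string_to_replace, letter_index):
--     if letter_index == len(string_to_replace):
--         new_string = string_to_replace[0:letter_index - 1]
--     else:
--         new_string = string_to_replace[0:letter_index - 1] + string_to_replace[letter_index + 1:]
--
--     return new_string
-- ===== SOURCE B (Python) =====
-- def replace_all_polymer(aoc_input):
--     stack = []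
--     for c in aoc_input.replace('\n', ''):
--         if stack and abs(ord(stack[-1]) - ord(c)) == 32:
--             stack.pop()
--         else:
--             stack.append(c)
--     return ''.join(stack)
-- ===== Notes on version B (the rewrite author's own statement) =====
-- stated objective: faster
-- what changed: A repeatedly rescans the whole string, rebuilding it by slicing on every removed pair, until a full pass removes nothing; B is a single left-to-right pass with a stack (push each character, pop when it reacts with the stack top). Pre_ excludes strings that (ignoring newlines) contain a character together with both its +32 and -32 ASCII neighbours: on those the pair-removal rewriting is non-confluent, A's and B's normal forms are both defensible, and they can differ.
-- outside the precondition, e.g. on replace_all_polymer('qMm|\\<yT'): A returns 'q|yT', B returns 'q<yT'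
import Mathlib
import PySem

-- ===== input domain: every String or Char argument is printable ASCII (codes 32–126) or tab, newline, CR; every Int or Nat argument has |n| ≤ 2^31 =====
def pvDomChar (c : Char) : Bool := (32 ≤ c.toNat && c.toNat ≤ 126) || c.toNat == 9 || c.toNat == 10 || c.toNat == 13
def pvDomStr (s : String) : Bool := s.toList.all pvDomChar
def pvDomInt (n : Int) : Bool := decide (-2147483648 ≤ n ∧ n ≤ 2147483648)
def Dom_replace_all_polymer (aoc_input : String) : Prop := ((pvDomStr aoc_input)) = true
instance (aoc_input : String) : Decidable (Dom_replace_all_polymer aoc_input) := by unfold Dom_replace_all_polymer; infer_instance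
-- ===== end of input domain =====

-- B replaces A's repeated rescan-and-splice passes by one left-to-right pass with a stack
-- (asymptotically faster); on Pre_ (confluent inputs) the results provably coincide.

-- ===== PORT A =====
-- same_type_different_polarity(letter1, letter2)
def same_type_different_polarity (letter1 letter2 : Char) : Bool :=
  let letter_difference : Int := (letter1.toNat : Int) - (letter2.toNat : Int)
  if letter_difference.natAbs = 32 then true else false

-- replace_one_substring(string_to_replace, letter_index)  (strings as List Char)
def replace_one_substring (string_to_replace : List Char) (letter_index : Nat) : List Char :=
  if letter_index = string_to_replace.length then
    PySem.List.slice string_to_replace (some 0) (some ((letter_index : Int) - 1))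
  else
    PySem.List.slice string_to_replace (some 0) (some ((letter_index : Int) - 1)) ++
      PySem.List.slice string_to_replace (some ((letter_index : Int) + 1)) none

-- the 'for k in range(1, len(aoc_input))' loop; fuel = number of range items still to visit
-- (len(aoc_input) - k, fixed at loop entry exactly as Python fixes the range); returns the
-- string and the updated replace_in_this_loop counter
def pvInnerA : Nat → List Char → Nat → Nat → List Char × Nat
  | 0, s, _, cnt => (s, cnt)                                   -- range exhausted
  | fuel + 1, s, k, cnt =>
    if (k : Int) > (s.length : Int) - 1 then (s, cnt)          -- 'if k > len(aoc_input) - 1: break'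
    else
      let previous_letter := s.getD (k - 1) ' '                -- in range: 1 ≤ k ≤ len-1
      let this_letter := s.getD k ' '
      if same_type_different_polarity this_letter previous_letter then
        pvInnerA fuel (replace_one_substring s k) (k + 1) (cnt + 1)
      else
        pvInnerA fuel s (k + 1) cnt

-- the 'while not finished_loop' loop; fuel bounds the iterations: every iteration except the
-- last removes at least one pair (two characters), so length+1 iterations always suffice
def pvOuterAGo : Nat → List Char → List Char
  | 0, s => s
  | fuel + 1, s =>
    let r := pvInnerA (s.length - 1) s 1 0
    if r.2 = 0 then r.1 else pvOuterAGo fuel r.1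

def replace_all_polymer (aoc_input : String) : String :=
  let s := (PySem.Str.replace aoc_input "\n" "").toList
  String.ofList (pvOuterAGo (s.length + 1) s)

-- ===== PORT B =====
-- abs(ord(a) - ord(b)) == 32
def pvReactB (a b : Char) : Bool := ((a.toNat : Int) - (b.toNat : Int)).natAbs == 32

-- one iteration of Source B's for loop: pop the stack top if it reacts with c, else push c
-- (stack top kept at the head of the list)
def pvStep (st : List Char) (c : Char) : List Char :=
  match st with
  | t :: st' => if pvReactB t c then st' else c :: t :: st'
  | [] => [c]

def replace_all_polymer_alt (aoc_input : String) : String :=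
  String.ofList (((PySem.Str.replace aoc_input "\n" "").toList.foldl pvStep []).reverse)

-- ===== PRECONDITION & SPEC =====
-- Pre_ excludes strings that (ignoring newlines) contain a character together with BOTH its
-- +32 and -32 ASCII neighbours: there the pair-removal rewriting is non-confluent, A's and
-- B's fully-reacted results are both defensible normal forms, and they can differ.
def Pre_replace_all_polymer (aoc_input : String) : Prop :=
  ((aoc_input.toList.filter (fun c => !(c == '\n'))).all fun x =>
    !(((aoc_input.toList.filter (fun c => !(c == '\n'))).any fun y => y.toNat == x.toNat + 32) &&
      ((aoc_input.toList.filter (fun c => !(c == '\n'))).any fun z => x.toNat == z.toNat + 32))) = true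
instance (aoc_input : String) : Decidable (Pre_replace_all_polymer aoc_input) := by
  unfold Pre_replace_all_polymer; infer_instance

def pvWitness_replace_all_polymer : String := "dabA"

def Spec_replace_all_polymer (aoc_input : String) (out : String) : Prop :=
  out = replace_all_polymer_alt aoc_input
instance (aoc_input : String) (out : String) : Decidable (Spec_replace_all_polymer aoc_input out) := by
  unfold Spec_replace_all_polymer; infer_instance

-- ===== CLAIM =====
def Claim_equal_replace_all_polymer : Prop :=
  ∀ (aoc_input : String), Dom_replace_all_polymer aoc_input →
    Pre_replace_all_polymer aoc_input →
    Spec_replace_all_polymer aoc_input (replace_all_polymer aoc_input)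

-- ===== LEMMAS AND PROOFS =====

-- 'no x with both its +32 and -32 neighbours present' on an arbitrary character list
def pvGood (S : List Char) : Prop :=
  ∀ x ∈ S, ¬((∃ y ∈ S, y.toNat = x.toNat + 32) ∧ (∃ z ∈ S, x.toNat = z.toNat + 32))

theorem pvGood_of_all (S : List Char)
    (h : (S.all fun x =>
      !((S.any fun y => y.toNat == x.toNat + 32) &&
        (S.any fun z => x.toNat == z.toNat + 32))) = true) : pvGood S := by
  intro x hx hcon
  obtain ⟨⟨y, hy, hyn⟩, ⟨z, hz, hzn⟩⟩ := hcon
  have hx' := List.all_eq_true.mp h x hx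
  simp only [Bool.not_eq_true', Bool.and_eq_false_iff, List.any_eq_false] at hx'
  rcases hx' with h' | h'
  · exact absurd (by simpa using hyn) (by simpa using h' y hy)
  · exact absurd (by simpa using hzn) (by simpa using h' z hz)

-- proof-side mirror of one pass of A's inner loop, with the reaction count
def pvPassC : List Char → List Char × Nat
  | [] => ([], 0)
  | [a] => ([a], 0)
  | a :: b :: rest =>
    if ((a.toNat : Int) - (b.toNat : Int)).natAbs = 32 then
      match rest with
      | [] => ([], 1)
      | c :: rest' => ((c :: (pvPassC rest').1), (pvPassC rest').2 + 1)
    else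
      (a :: (pvPassC (b :: rest)).1, (pvPassC (b :: rest)).2)

theorem pvReactB_iff (a b : Char) :
    pvReactB a b = true ↔ (a.toNat = b.toNat + 32 ∨ b.toNat = a.toNat + 32) := by
  simp [pvReactB]
  omega

theorem pvReactB_symm (a b : Char) : pvReactB a b = pvReactB b a := by
  simp [pvReactB]
  omega


-- under pvGood, the reaction partner of a character (among chars of S) is unique
theorem pvUniq {S : List Char} (hG : pvGood S) {t x b : Char}
    (ht : t ∈ S) (hx : x ∈ S) (hb : b ∈ S)
    (h1 : pvReactB t x = true) (h2 : pvReactB x b = true) : t = b := by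
  rw [pvReactB_iff] at h1 h2
  have hne : t.toNat = b.toNat := by
    rcases h1 with h1 | h1 <;> rcases h2 with h2 | h2
    · exact absurd ⟨⟨t, ht, by omega⟩, ⟨b, hb, by omega⟩⟩ (hG x hx)
    · omega
    · omega
    · exact absurd ⟨⟨b, hb, by omega⟩, ⟨t, ht, by omega⟩⟩ (hG x hx)
  have := congrArg Char.ofNat hne
  rwa [Char.ofNat_toNat, Char.ofNat_toNat] at this

-- stack invariant: adjacent stack entries never react, all entries come from S
def pvStInv (S st : List Char) : Prop :=
  List.IsChain (fun a b => pvReactB a b = false) st ∧ ∀ c ∈ st, c ∈ S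

theorem pvStep_inv {S st : List Char} {c : Char} (h : pvStInv S st) (hc : c ∈ S) :
    pvStInv S (pvStep st c) := by
  obtain ⟨hch, hmem⟩ := h
  cases st with
  | nil =>
    refine ⟨?_, ?_⟩
    · simp [pvStep]
    · intro d hd; simp [pvStep] at hd; subst hd; exact hc
  | cons t st' =>
    by_cases hr : pvReactB t c = true
    · simp only [pvStep, if_pos hr]
      exact ⟨hch.tail, fun d hd => hmem d (List.mem_cons_of_mem _ hd)⟩
    · simp only [pvStep, if_neg hr]
      refine ⟨List.isChain_cons_cons.mpr ⟨by rw [pvReactB_symm]; simpa using hr, hch⟩, ?_⟩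
      intro d hd
      rcases List.mem_cons.mp hd with h | h
      · subst h; exact hc
      · exact hmem d h


-- deleting an adjacent reacting pair at the front is invisible to the stack
theorem pvStep2 {S st : List Char} {a b : Char} (hG : pvGood S)
    (hinv : pvStInv S st) (ha : a ∈ S) (hb : b ∈ S)
    (hr : pvReactB a b = true) : pvStep (pvStep st a) b = st := by
  obtain ⟨hch, hmem⟩ := hinv
  cases st with
  | nil => simp [pvStep, hr]
  | cons t st' =>
    by_cases hta : pvReactB t a = true
    · have htb : t = b := pvUniq hG (hmem t (by simp)) ha hb hta hr
      simp only [pvStep, if_pos hta]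
      cases st' with
      | nil => simp [htb]
      | cons t2 st'' =>
        have h12 : pvReactB t t2 = false := (List.isChain_cons_cons.mp hch).1
        have h21 : pvReactB t2 b = false := by rw [pvReactB_symm, ← htb]; exact h12
        simp [h21, htb]
    · simp only [pvStep, if_neg hta, if_pos hr]

-- one pass of A (as pvPassC) does not change the stack-reduced value
theorem pvF_pass {S : List Char} (hG : pvGood S) :
    ∀ s : List Char, (∀ c ∈ s, c ∈ S) →
      ∀ st, pvStInv S st →
        List.foldl pvStep st (pvPassC s).1 = List.foldl pvStep st s := by
  intro s
  fun_induction pvPassC s with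
  | case1 => intro _ st _; rfl
  | case2 a => intro _ st _; rfl
  | case3 a b hr =>
    intro hs st hinv
    have ha : a ∈ S := hs a (by simp)
    have hb : b ∈ S := hs b (by simp)
    have hrB : pvReactB a b = true := by simp [pvReactB, hr]
    exact (pvStep2 hG hinv ha hb hrB).symm
  | case4 a b hr c rest' ih =>
    intro hs st hinv
    have ha : a ∈ S := hs a (by simp)
    have hb : b ∈ S := hs b (by simp)
    have hc : c ∈ S := hs c (by simp)
    have hrB : pvReactB a b = true := by simp [pvReactB, hr]
    show List.foldl pvStep (pvStep st c) (pvPassC rest').1 =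
      List.foldl pvStep (pvStep (pvStep st a) b) (c :: rest')
    rw [pvStep2 hG hinv ha hb hrB]
    exact ih (fun d hd => hs d (by simp; tauto)) (pvStep st c) (pvStep_inv hinv hc)
  | case5 a b rest hr ih =>
    intro hs st hinv
    have ha : a ∈ S := hs a (by simp)
    exact ih (fun d hd => hs d (by simp at hd ⊢; tauto)) (pvStep st a) (pvStep_inv hinv ha)

-- an irreducible string passes through the stack untouched
theorem pvF_irred :
    ∀ (s : List Char), List.IsChain (fun a b => pvReactB a b = false) s →
      ∀ st, (∀ t c, st = t :: st.tail → s = c :: s.tail → pvReactB t c = false) →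
        List.foldl pvStep st s = s.reverse ++ st := by
  intro s
  induction s with
  | nil => intro _ st _; simp
  | cons c cs ih =>
    intro hch st hhd
    have hstep : pvStep st c = c :: st := by
      match st with
      | [] => rfl
      | t :: st' => simp [pvStep, hhd t c rfl rfl]
    simp only [List.foldl_cons, hstep]
    rw [ih hch.tail (c :: st) ?_]
    · simp
    · intro t d ht hd
      simp at ht
      have hd' : d ∈ cs.head? := by rw [hd]; rfl
      exact ht ▸ List.IsChain.rel_head? hch hd' 

-- ===== lemmas about A's loops (pass characterisation), reused machinery =====

theorem pvInnerA_stop (fuel : Nat) (s : List Char) (k cnt : Nat)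
    (h : (k : Int) > (s.length : Int) - 1) : pvInnerA fuel s k cnt = (s, cnt) := by
  cases fuel with
  | zero => rfl
  | succ fuel => rw [pvInnerA, if_pos h]

theorem pvReplace_spec (q : List Char) (a b : Char) (t2 : List Char) :
    replace_one_substring ((q ++ [a]) ++ b :: t2) (q.length + 1) = q ++ t2 := by
  unfold replace_one_substring
  rw [if_neg (by simp)]
  have e1 : ((q.length + 1 : Nat) : Int) - 1 = ((q.length : Nat) : Int) := by omega
  have e2 : ((q.length + 1 : Nat) : Int) + 1 = ((q.length + 2 : Nat) : Int) := by omega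
  rw [e1, e2, PySem.List.slice_from_natCast, PySem.List.slice_zero_start,
    PySem.List.slice_to_natCast]
  simp [List.drop_append]

-- A's inner loop at position k = |q|+1 on (q ++ [a]) ++ t behaves exactly like the
-- pass pvPassC on (a :: t), with the already-finalised prefix q untouched
theorem pvInner_eq_pass (fuel : Nat) : ∀ (t : List Char), t.length ≤ fuel →
    ∀ (q : List Char) (a : Char) (cnt : Nat),
    pvInnerA fuel ((q ++ [a]) ++ t) (q.length + 1) cnt =
      (q ++ (pvPassC (a :: t)).1, cnt + (pvPassC (a :: t)).2) := by
  induction fuel with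
  | zero =>
    intro t ht q a cnt
    have : t = [] := by cases t <;> simp_all
    subst this
    simp [pvInnerA, pvPassC]
  | succ fuel ih =>
    intro t ht q a cnt
    match t with
    | [] =>
      rw [pvInnerA_stop _ _ _ _ (by simp)]
      simp [pvPassC]
    | b :: t2 =>
      rw [pvInnerA]
      rw [if_neg (by simp only [List.length_append, List.length_cons, List.length_nil]; push_cast; omega)]
      by_cases hr : ((a.toNat : Int) - (b.toNat : Int)).natAbs = 32
      · rw [if_pos (by simp [same_type_different_polarity]; omega)]
        rw [pvReplace_spec]
        match t2 with
        | [] =>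
          rw [pvInnerA_stop _ _ _ _ (by simp only [List.length_append, List.length_nil]; push_cast; omega)]
          simp [pvPassC, hr]
        | [c] =>
          rw [pvInnerA_stop _ _ _ _ (by simp only [List.length_append, List.length_cons, List.length_nil]; push_cast; omega)]
          simp [pvPassC, hr]
        | c :: d :: t4 =>
          have e : q ++ c :: d :: t4 = (((q ++ [c]) ++ [d])) ++ t4 := by simp
          have ek : q.length + 1 + 1 = (q ++ [c]).length + 1 := by simp
          rw [e, ek, ih t4 (by simp at ht; omega) (q ++ [c]) d (cnt + 1)]
          simp [pvPassC, hr]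
          omega
      · rw [if_neg (by simp [same_type_different_polarity]; omega)]
        have e : (q ++ [a]) ++ b :: t2 = ((q ++ [a]) ++ [b]) ++ t2 := by simp
        have ek : q.length + 1 + 1 = (q ++ [a]).length + 1 := by simp
        rw [e, ek, ih t2 (by simp at ht; omega) (q ++ [a]) b cnt]
        rw [pvPassC.eq_def (a :: b :: t2)]
        simp [hr]

-- a pass keeps a sublist of the characters
theorem pvPassC_sublist (s : List Char) : (pvPassC s).1.Sublist s := by
  fun_induction pvPassC s with
  | case1 => simp
  | case2 => simp
  | case3 a b hr => simp
  | case4 a b hr c rest' ih =>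
    exact ((List.cons_sublist_cons.mpr ih).cons b).cons a
  | case5 a b rest hr ih =>
    exact List.cons_sublist_cons.mpr ih

-- a pass removes exactly 2 characters per counted reaction
theorem pvPassC_len (s : List Char) : (pvPassC s).1.length + 2 * (pvPassC s).2 = s.length := by
  fun_induction pvPassC s with
  | case1 => rfl
  | case2 => rfl
  | case3 a b hr => simp
  | case4 a b hr c rest' ih =>
    simp at ih ⊢
    omega
  | case5 a b rest hr ih =>
    simp at ih ⊢
    omega

-- a pass with zero reactions returns the string unchanged, and it is irreducible
theorem pvPassC_zero : ∀ (s : List Char), (pvPassC s).2 = 0 →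
    (pvPassC s).1 = s ∧ List.IsChain (fun a b => pvReactB a b = false) s := by
  intro s
  fun_induction pvPassC s with
  | case1 => exact fun _ => ⟨rfl, by simp⟩
  | case2 a => exact fun _ => ⟨rfl, by simp⟩
  | case3 a b hr => intro h; simp at h
  | case4 a b hr c rest' ih => intro h; simp at h
  | case5 a b rest hr ih =>
    intro h
    obtain ⟨h1, h2⟩ := ih h
    refine ⟨by simpa using h1, List.isChain_cons_cons.mpr ⟨by simpa [pvReactB] using hr, h2⟩⟩

-- A's outer loop computes the stack reduction, given enough fuel and confluence (pvGood)
theorem pvOuter_eq_stack {S : List Char} (hG : pvGood S) :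
    ∀ (fuel : Nat) (s : List Char), (∀ c ∈ s, c ∈ S) → s.length < 2 * fuel →
      pvOuterAGo fuel s = (List.foldl pvStep [] s).reverse := by
  intro fuel
  induction fuel with
  | zero => intro s _ h; omega
  | succ fuel ih =>
    intro s hs hlen
    rw [pvOuterAGo]
    match s with
    | [] => rfl
    | a :: t =>
      have hpass := pvInner_eq_pass t.length t (le_refl _) [] a 0
      simp only [List.nil_append, List.singleton_append, List.length_nil, Nat.zero_add] at hpass
      have hfuel : (a :: t).length - 1 = t.length := by simp
      rw [hfuel, hpass]
      by_cases hc : (pvPassC (a :: t)).2 = 0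
      · simp only [hc]
        obtain ⟨h1, h2⟩ := pvPassC_zero (a :: t) hc
        rw [h1, pvF_irred (a :: t) h2 [] (by intro t c h _; exact absurd h (by simp))]
        simp
      · simp only [if_neg hc]
        have hsub := pvPassC_sublist (a :: t)
        have hlen2 := pvPassC_len (a :: t)
        rw [ih (pvPassC (a :: t)).1 (fun c hcm => hs c (hsub.mem hcm)) (by omega)]
        rw [pvF_pass hG (a :: t) hs [] ⟨by simp, by simp⟩]

-- PySem.Chars.replace with old = "\n", new = "" is exactly a filter
theorem pvReplaceGo_filter :
    ∀ (fuel : Nat) (l acc : List Char), l.length ≤ fuel →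
      PySem.Chars.replace.go ['\n'] [] fuel l acc =
        acc.reverse ++ l.filter (fun c => !(c == '\n')) := by
  intro fuel
  induction fuel with
  | zero =>
    intro l acc h
    have : l = [] := by cases l <;> simp_all
    subst this
    simp [PySem.Chars.replace.go]
  | succ fuel ih =>
    intro l acc h
    match l with
    | [] => simp [PySem.Chars.replace.go]
    | c :: t =>
      rw [PySem.Chars.replace.go]
      by_cases hc : c = '\n'
      · subst hc
        rw [if_pos (by simp [List.isPrefixOf])]
        simp only [List.length_cons] at h
        rw [ih _ _ (by simpa using Nat.le_of_succ_le_succ h)]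
        simp
      · rw [if_neg (by simp [List.isPrefixOf]; exact fun h => absurd h.symm hc)]
        rw [ih t (c :: acc) (by simpa using Nat.le_of_succ_le_succ h)]
        simp [hc]

theorem pvReplace_newline (s : String) :
    (PySem.Str.replace s "\n" "").toList = s.toList.filter (fun c => !(c == '\n')) := by
  rw [PySem.Str.toList_replace]
  show PySem.Chars.replace s.toList ['\n'] [] = _
  rw [PySem.Chars.replace]
  rw [if_neg (by simp)]
  exact pvReplaceGo_filter s.toList.length s.toList [] (le_refl _)

-- ===== VERDICT =====
set_option maxHeartbeats 1000000 in
theorem replace_all_polymer_spec : Claim_equal_replace_all_polymer := by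
  intro aoc_input _ hPre
  unfold Spec_replace_all_polymer replace_all_polymer replace_all_polymer_alt
  have hG : pvGood ((PySem.Str.replace aoc_input "\n" "").toList) := by
    rw [pvReplace_newline]
    exact pvGood_of_all _ hPre
  show String.ofList (pvOuterAGo ((PySem.Str.replace aoc_input "\n" "").toList.length + 1)
      (PySem.Str.replace aoc_input "\n" "").toList) = _
  exact congrArg String.ofList (pvOuter_eq_stack hG
    ((PySem.Str.replace aoc_input "\n" "").toList.length + 1)
    ((PySem.Str.replace aoc_input "\n" "").toList) (fun c hc => hc) (by omega))
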